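-- pv_equiv track=rewrite | github.com/SirFloIII/Perfekte-Graphen | manim project/RecognizingTriangulatedGraphs.py | pick_maximal_unnumbered_vertex
-- ===== SOURCE A (Python) =====
-- def pick_maximal_unnumbered_vertex(label, order):
--     max_vertex = None
--     max_value = None
--     for vertex, value in label.items():
--         if vertex in order:
--             continue
--         if lexographical_order(value, max_value):
--             max_vertex = vertex
--             max_value = value
--     return max_vertex
--
-- def lexographical_order(a, b):
--     if b is None or len(b) == 0:
--         return True
--     if a is None or len(a) == 0:
--         return False
--     if a[0] != b[0]:
--         return a[0] > b[0]
--     return lexographical_order(a[1:], b[1:])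
-- ===== SOURCE B (Python) =====
-- def pick_maximal_unnumbered_vertex(label, order):
--     cands = [(v, val) for v, val in label.items() if v not in order]
--     if not cands:
--         return None
--     cands.sort(key=lambda t: t[1])  # stable ascending sort; last element is the
--     return cands[-1][0]             # last-occurring maximum, matching A's tie rule
-- ===== Notes on version B (the rewrite author's own statement) =====
-- stated objective: alternative
-- what changed: Replaces the running-max scan with a custom recursive comparator by filter + stable ascending sort on the label value and taking the last element (last-of-maxima reproduces A's last-wins tie behaviour).
import Mathlib
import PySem

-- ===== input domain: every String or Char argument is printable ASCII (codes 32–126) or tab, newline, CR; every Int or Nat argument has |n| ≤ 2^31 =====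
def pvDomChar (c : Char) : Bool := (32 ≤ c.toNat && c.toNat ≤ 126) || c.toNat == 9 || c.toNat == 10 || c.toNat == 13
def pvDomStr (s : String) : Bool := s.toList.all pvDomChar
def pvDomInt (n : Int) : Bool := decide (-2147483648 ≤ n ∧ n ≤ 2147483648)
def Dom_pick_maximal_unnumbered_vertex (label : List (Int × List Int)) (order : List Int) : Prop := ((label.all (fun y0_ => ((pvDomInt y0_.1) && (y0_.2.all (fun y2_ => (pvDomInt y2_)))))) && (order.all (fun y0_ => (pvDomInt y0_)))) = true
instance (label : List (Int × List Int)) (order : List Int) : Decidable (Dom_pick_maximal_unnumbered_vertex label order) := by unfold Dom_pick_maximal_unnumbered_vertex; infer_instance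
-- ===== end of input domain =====

-- B replaces A's running-max scan (with a recursive comparator) by filter + stable
-- ascending sort on the label value, returning the last element; same cost class, alternative algorithm.


-- ===== PORT A =====
-- literal port of lexographical_order; in A the arguments can be None (the initial sentinel)
def lexographical_order : Option (List Int) → Option (List Int) → Bool
  | _, none => true
  | _, some [] => true
  | none, some (_ :: _) => false
  | some [], some (_ :: _) => false
  | some (a0 :: as_), some (b0 :: bs) =>
      if a0 ≠ b0 then decide (a0 > b0) else lexographical_order (some as_) (some bs)
  termination_by _ b => (b.map List.length).getD 0
  decreasing_by simp

def pick_maximal_unnumbered_vertex (label : List (Int × List Int)) (order : List Int) : Option Int :=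
  (label.foldl
    (fun (st : Option Int × Option (List Int)) vv =>
      if order.contains vv.1 then st
      else if lexographical_order (some vv.2) st.2 then (some vv.1, some vv.2) else st)
    (none, none)).1

-- ===== PORT B =====
def pick_maximal_unnumbered_vertex_alt (label : List (Int × List Int)) (order : List Int) : Option Int :=
  let cands := label.filter (fun t => !(order.contains t.1))
  if cands.isEmpty then none
  else ((PySem.List.sorted cands (fun t => t.2)).getLast?).map (·.1)  -- cands[-1][0] of the sorted list

-- ===== PRECONDITION & SPEC =====
def Spec_pick_maximal_unnumbered_vertex (label : List (Int × List Int)) (order : List Int) (out : Option Int) : Prop := out = pick_maximal_unnumbered_vertex_alt label order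
instance (label : List (Int × List Int)) (order : List Int) (out : Option Int) : Decidable (Spec_pick_maximal_unnumbered_vertex label order out) := by unfold Spec_pick_maximal_unnumbered_vertex; infer_instance

-- ===== CLAIM (what is proved, stated in full; the proofs are below) =====
def Claim_equal_pick_maximal_unnumbered_vertex : Prop := ∀ (label : List (Int × List Int)) (order : List Int), Dom_pick_maximal_unnumbered_vertex label order → Spec_pick_maximal_unnumbered_vertex label order (pick_maximal_unnumbered_vertex label order)

-- ===== LEMMAS AND PROOFS =====

-- A's comparator on real lists is exactly "not (a < b)" for the lexicographic order on List Int
theorem lexographical_order_eq_not_lt (b a : List Int) :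
    lexographical_order (some a) (some b) = !decide (a < b) := by
  induction b generalizing a with
  | nil =>
    cases a <;> simp [lexographical_order]
  | cons b0 bs ih =>
    cases a with
    | nil => simp [lexographical_order]
    | cons a0 as_ =>
      by_cases h : a0 = b0
      · subst h
        simp [lexographical_order, ih]
      · have hlt : ((a0 :: as_ : List Int) < b0 :: bs) ↔ a0 < b0 ∨ (a0 = b0 ∧ as_ < bs) :=
          List.cons_lt_cons_iff
        simp only [lexographical_order, if_pos h]
        by_cases h2 : a0 < b0
        · simp [hlt, h2]
          omega
        · simp [hlt, h2, h]
          omega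

def pvBefore : (Int × List Int) → (Int × List Int) → Bool :=
  fun a b => decide (a.2 < b.2)

def pvP : (Int × List Int) → (Int × List Int) → Prop := fun a b => a.2 ≤ b.2

theorem insertBy_ne_nil (x : Int × List Int) (acc : List (Int × List Int)) :
    PySem.List.insertBy pvBefore x acc ≠ [] := by
  cases acc with
  | nil => simp [PySem.List.insertBy]
  | cons y ys =>
    simp only [PySem.List.insertBy]
    split <;> simp

theorem getLast?_insertBy (x : Int × List Int) (acc : List (Int × List Int))
    (h : acc.Pairwise pvP) :
    (PySem.List.insertBy pvBefore x acc).getLast? =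
      match acc.getLast? with
      | none => some x
      | some t => if x.2 < t.2 then some t else some x := by
  induction acc with
  | nil => simp [PySem.List.insertBy]
  | cons y ys ih =>
    rw [List.pairwise_cons] at h
    simp only [PySem.List.insertBy]
    by_cases hb : pvBefore x y = true
    · rw [if_pos hb]
      have hxy : x.2 < y.2 := by simpa [pvBefore] using hb
      cases hys : ys.getLast? with
      | none =>
        have : ys = [] := by cases ys <;> simp_all
        subst this
        simp [hxy]
      | some t =>
        have ht : t ∈ ys := List.mem_of_getLast? hys
        have hyt : y.2 ≤ t.2 := h.1 t ht
        have hlast : (y :: ys).getLast? = some t := by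
          cases ys with
          | nil => simp_all
          | cons z zs => rw [List.getLast?_cons_cons, hys]
        have hxlast : (x :: y :: ys).getLast? = some t := by
          rw [List.getLast?_cons_cons]; exact hlast
        rw [hxlast, hlast]
        have : x.2 < t.2 := lt_of_lt_of_le hxy hyt
        simp [this]
    · rw [if_neg hb]
      have hxy : ¬ x.2 < y.2 := by simpa [pvBefore] using hb
      have hne := insertBy_ne_nil x ys
      cases hi : PySem.List.insertBy pvBefore x ys with
      | nil => exact absurd hi hne
      | cons z zs =>
        rw [List.getLast?_cons_cons, ← hi, ih h.2]
        cases hys : ys.getLast? with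
        | none =>
          have : ys = [] := by cases ys <;> simp_all
          subst this
          simp [hxy]
        | some t =>
          have hlast : (y :: ys).getLast? = some t := by
            cases ys with
            | nil => simp_all
            | cons z' zs' => rw [List.getLast?_cons_cons, hys]
          rw [hlast]

theorem pairwise_insertBy (x : Int × List Int) (acc : List (Int × List Int))
    (h : acc.Pairwise pvP) :
    (PySem.List.insertBy pvBefore x acc).Pairwise pvP := by
  induction acc with
  | nil => simp [PySem.List.insertBy, pvP]
  | cons y ys ih =>
    rw [List.pairwise_cons] at h
    simp only [PySem.List.insertBy]
    by_cases hb : pvBefore x y = true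
    · rw [if_pos hb]
      have hxy : x.2 < y.2 := by simpa [pvBefore] using hb
      refine List.Pairwise.cons ?_ (List.Pairwise.cons h.1 h.2)
      intro z hz
      rcases List.mem_cons.mp hz with hz | hz
      · subst hz; exact le_of_lt hxy
      · exact le_trans (le_of_lt hxy) (h.1 z hz)
    · rw [if_neg hb]
      have hyx : y.2 ≤ x.2 := by
        have : ¬ x.2 < y.2 := by simpa [pvBefore] using hb
        exact le_of_not_gt this
      refine List.Pairwise.cons ?_ (ih h.2)
      intro z hz
      rcases (PySem.List.mem_insertBy pvBefore x z ys).1 hz with hz | hz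
      · subst hz; exact hyx
      · exact h.1 z hz

-- A's loop step over already-filtered candidates
def pvStepA (st : Option Int × Option (List Int)) (vv : Int × List Int) :
    Option Int × Option (List Int) :=
  if lexographical_order (some vv.2) st.2 then (some vv.1, some vv.2) else st

def pvStA (acc : List (Int × List Int)) : Option Int × Option (List Int) :=
  ((acc.getLast?).map (·.1), (acc.getLast?).map (·.2))

theorem step_commute (x : Int × List Int) (acc : List (Int × List Int))
    (h : acc.Pairwise pvP) :
    pvStepA (pvStA acc) x = pvStA (PySem.List.insertBy pvBefore x acc) := by
  unfold pvStepA pvStA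
  rw [getLast?_insertBy x acc h]
  cases hl : acc.getLast? with
  | none => simp [lexographical_order]
  | some t =>
    simp only [Option.map_some]
    rw [lexographical_order_eq_not_lt]
    by_cases hlt : x.2 < t.2
    · simp [hlt]
    · simp [hlt]

theorem foldl_inv (l : List (Int × List Int)) (acc : List (Int × List Int))
    (h : acc.Pairwise pvP) :
    l.foldl pvStepA (pvStA acc) =
      pvStA (l.foldl (fun a x => PySem.List.insertBy pvBefore x a) acc) := by
  induction l generalizing acc with
  | nil => rfl
  | cons x xs ih =>
    simp only [List.foldl_cons]
    rw [step_commute x acc h]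
    exact ih _ (pairwise_insertBy x acc h)

-- ===== VERDICT (by name: the statement is the Claim_ definition above) =====
theorem pick_maximal_unnumbered_vertex_spec : Claim_equal_pick_maximal_unnumbered_vertex := by
  intro label order _
  unfold Spec_pick_maximal_unnumbered_vertex
  unfold pick_maximal_unnumbered_vertex pick_maximal_unnumbered_vertex_alt
  simp only []
  set cands := label.filter (fun t => !(order.contains t.1)) with hcands
  have hinit : pvStA ([] : List (Int × List Int)) = (none, none) := rfl
  have hfold :
      label.foldl
        (fun (st : Option Int × Option (List Int)) vv =>
          if order.contains vv.1 then st
          else if lexographical_order (some vv.2) st.2 then (some vv.1, some vv.2) else st)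
        (none, none)
      = cands.foldl pvStepA (pvStA []) := by
    rw [hinit, hcands, List.foldl_filter]
    congr 1
    funext st x
    by_cases hc : x.1 ∈ order <;> simp [hc, pvStepA]
  have hs : PySem.List.sorted cands (fun t => t.2) =
      cands.foldl (fun a x => PySem.List.insertBy pvBefore x a) [] :=
    PySem.List.sorted_eq_foldl_insertBy cands (fun t => t.2)
  rw [hfold, foldl_inv cands [] (by simp), ← hs]
  by_cases he : cands.isEmpty
  · have hnil : cands = [] := by simpa [List.isEmpty_iff] using he
    simp [hnil, pvStA, PySem.List.sorted]
  · rw [if_neg he]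
    simp [pvStA]
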